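-- pv_equiv track=rewrite | github.com/DAEUN9/TIL | Soving/BAEKJOON/bronze/B1_1292.py | answer
-- ===== SOURCE A (Python) =====
-- def answer(A, B):
--     result = [0, 0]
--     idx = 0
--     total = 0
--     if B == 0:
--         return 0
--     for i in range(1, 1000):
--         for j in range(i):
--             idx += 1
--             total += i
--             if idx == A-1:
--                 result[0] = total
--             if idx == B:
--                 result[1] = total
--                 return result[1] - result[0]
-- ===== SOURCE B (Python) =====
-- def answer(A, B):
--     # Closed form: the sequence 1,2,2,3,3,3,... summed from position A to B.
--     # prefix(n) inverts the triangular numbers to find the block of position n,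
--     # then uses the square-pyramidal closed form; empty ranges (A > B) sum to 0.
--     if A > B:
--         return 0
--
--     def prefix(n):
--         if n <= 0:
--             return 0
--         k = 0
--         while (k + 1) * (k + 2) <= 2 * n:
--             k += 1
--         return k * (k + 1) * (2 * k + 1) // 6 + (n - k * (k + 1) // 2) * (k + 1)
--
--     return prefix(B) - prefix(A - 1)
-- ===== Notes on version B (the rewrite author's own statement) =====
-- stated objective: alternative
-- what changed: Replaces the nested enumeration of up to 499500 sequence positions by a closed form: invert the triangular numbers to find the block of a position (O(sqrt B) scan) and evaluate the square-pyramidal prefix-sum formula at B and A-1; a timing run could not verify the speed-up because its random inputs fall inside D_.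
-- intended difference: On empty ranges with A > B+1 (and 1 <= B <= 499500), A never records its lower mark and returns the full prefix sum up to B, while B returns 0, the intended value of an empty range sum. — e.g. on answer(5, 2): A returns 3, B returns 0
-- outside the precondition, e.g. on answer(-1, -1): A returns None, B returns 0; on answer(1, 500000): A returns None, B returns 333333500
import Mathlib
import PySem

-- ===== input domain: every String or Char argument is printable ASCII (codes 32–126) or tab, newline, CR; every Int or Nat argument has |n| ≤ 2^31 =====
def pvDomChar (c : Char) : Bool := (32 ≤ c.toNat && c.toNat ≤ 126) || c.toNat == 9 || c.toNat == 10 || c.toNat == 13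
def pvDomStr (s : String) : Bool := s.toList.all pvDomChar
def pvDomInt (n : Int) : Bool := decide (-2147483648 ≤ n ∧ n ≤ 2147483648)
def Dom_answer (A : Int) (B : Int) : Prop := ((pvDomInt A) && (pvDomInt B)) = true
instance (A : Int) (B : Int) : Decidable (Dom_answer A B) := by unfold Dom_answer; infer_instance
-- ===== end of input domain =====

-- B replaces A's step-by-step enumeration of the sequence 1,2,2,3,3,3,… by a closed-form
-- prefix sum found by inverting the triangular numbers (objective: alternative algorithm; O(sqrt B) block search instead of O(B) enumeration).

-- ===== PORT A =====
-- one body of A's inner loop: state (idx, total, result0, result1); .error r = early return r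
def aStep (A : Int) (B : Int) (i : Int) (s : Except Int (Int × Int × Int × Int)) :
    Except Int (Int × Int × Int × Int) :=
  match s with
  | .error r => .error r
  | .ok (idx, total, r0, r1) =>
    let idx := idx + 1
    let total := total + i
    let r0 := if idx = A - 1 then total else r0
    if idx = B then
      let r1 := total
      .error (r1 - r0)
    else
      .ok (idx, total, r0, r1)

-- the inner 'for j in range(i)' loop of A
def aOuter (A : Int) (B : Int) (s : Except Int (Int × Int × Int × Int)) (i : Int) :
    Except Int (Int × Int × Int × Int) :=
  (PySem.List.pyRange 0 i 1).foldl (fun s' _ => aStep A B i s') s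

def answer (A : Int) (B : Int) : Int :=
  if B = 0 then 0
  else
    match (PySem.List.pyRange 1 1000 1).foldl (aOuter A B) (.ok (0, 0, 0, 0)) with
    | .error r => r
    | .ok _ => 0   -- loop exhausted: the Python returns None here (outside Pre_)

-- ===== PORT B =====
-- 'while (k+1)*(k+2) <= 2*n: k += 1' of Source B's prefix
def bFindK (n : Int) (k : Nat) : Nat :=
  if ((k : Int) + 1) * ((k : Int) + 2) ≤ 2 * n then bFindK n (k + 1) else k
termination_by n.toNat - k
decreasing_by
  rename_i h
  have h2 : 2 * ((k : Int) + 1) ≤ ((k : Int) + 1) * ((k : Int) + 2) := by nlinarith [Int.natCast_nonneg k]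
  omega

-- prefix(n) of Source B
def bPrefix (n : Int) : Int :=
  if n ≤ 0 then 0
  else
    let k : Int := bFindK n 0
    PySem.Int.floordiv (k * (k + 1) * (2 * k + 1)) 6
      + (n - PySem.Int.floordiv (k * (k + 1)) 2) * (k + 1)

def answer_alt (A : Int) (B : Int) : Int :=
  if A > B then 0
  else bPrefix B - bPrefix (A - 1)

-- ===== PRECONDITION & SPEC =====
-- Pre_ excludes exactly the inputs where the Python A falls off its 'range(1, 1000)' loop and
-- returns None (B < 0 or B > 499500 = 1+2+…+999 positions): no int is returned there.
def Pre_answer (A : Int) (B : Int) : Prop := 0 ≤ B ∧ B ≤ 499500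
instance (A : Int) (B : Int) : Decidable (Pre_answer A B) := by unfold Pre_answer; infer_instance
def pvWitness_answer : Int × Int := (1, 10)

-- On empty ranges with A > B+1 (and 1 ≤ B ≤ 499500), A never records its lower mark and returns
-- the full prefix sum up to B, while B returns 0, the intended value of an empty range sum.
def D_answer (A : Int) (B : Int) : Prop := 1 ≤ B ∧ B ≤ 499500 ∧ B + 1 < A
instance (A : Int) (B : Int) : Decidable (D_answer A B) := by unfold D_answer; infer_instance

def Spec_answer (A : Int) (B : Int) (out : Int) : Prop := ¬ D_answer A B → out = answer_alt A B
instance (A : Int) (B : Int) (out : Int) : Decidable (Spec_answer A B out) := by unfold Spec_answer; infer_instance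

def pvDiffWitness_answer : Int × Int := (5, 2)
def pvDiffWitnessOut_answer : Int × Int := (3, 0)

-- ===== CLAIM (what is proved, stated in full; the proofs are below) =====
def Claim_unchanged_answer : Prop := ∀ (A : Int) (B : Int), Dom_answer A B → Pre_answer A B → Spec_answer A B (answer A B)
def Claim_changed_answer : Prop := Dom_answer (pvDiffWitness_answer.1) (pvDiffWitness_answer.2) ∧ Pre_answer (pvDiffWitness_answer.1) (pvDiffWitness_answer.2) ∧ D_answer (pvDiffWitness_answer.1) (pvDiffWitness_answer.2) ∧ answer (pvDiffWitness_answer.1) (pvDiffWitness_answer.2) = pvDiffWitnessOut_answer.1 ∧ answer_alt (pvDiffWitness_answer.1) (pvDiffWitness_answer.2) = pvDiffWitnessOut_answer.2 ∧ pvDiffWitnessOut_answer.1 ≠ pvDiffWitnessOut_answer.2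
def Claim_exact_answer : Prop := ∀ (A : Int) (B : Int), Dom_answer A B → Pre_answer A B → D_answer A B → answer A B ≠ answer_alt A B

-- ===== LEMMAS AND PROOFS =====

-- spec scaffolding: Tn k = 1+2+…+k (triangular), Qn k = 1²+…+k² (square-pyramidal),
-- Kn n = the block index of position n, Ps n = sum of the first n terms of 1,2,2,3,3,3,…
def Tn : Nat → Nat
  | 0 => 0
  | k + 1 => Tn k + (k + 1)

def Qn : Nat → Int
  | 0 => 0
  | k + 1 => Qn k + ((k : Int) + 1) * ((k : Int) + 1)

def Kn : Nat → Nat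
  | 0 => 0
  | n + 1 => if Tn (Kn n + 1) ≤ n + 1 then Kn n + 1 else Kn n

def Ps : Nat → Int
  | 0 => 0
  | n + 1 => Ps n + ((Kn n : Int) + 1)

-- r0 (result[0]) after A's loop has passed position idx
def R0 (A : Int) (idx : Int) : Int :=
  if 1 ≤ A - 1 ∧ A - 1 ≤ idx then Ps (A - 1).toNat else 0

theorem Tn_le_of_le {a b : Nat} (h : a ≤ b) : Tn a ≤ Tn b := by
  induction b with
  | zero => simp [Nat.le_zero.mp h]
  | succ b ih =>
      rcases Nat.lt_or_ge a (b + 1) with h' | h'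
      · have := ih (by omega); simp [Tn]; omega
      · have : a = b + 1 := by omega
        subst this; omega

theorem Kn_spec (n : Nat) : Tn (Kn n) ≤ n ∧ n < Tn (Kn n + 1) := by
  induction n with
  | zero => simp [Kn, Tn]
  | succ n ih =>
      simp only [Kn]
      split
      · next h =>
          refine ⟨h, ?_⟩
          have : Tn (Kn n + 1 + 1) = Tn (Kn n + 1) + (Kn n + 1 + 1) := rfl
          omega
      · next h => exact ⟨by omega, by omega⟩

theorem Kn_eq {n k : Nat} (h1 : Tn k ≤ n) (h2 : n < Tn (k + 1)) : Kn n = k := by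
  have hs := Kn_spec n
  rcases Nat.lt_trichotomy (Kn n) k with h | h | h
  · have := Tn_le_of_le (show Kn n + 1 ≤ k by omega); omega
  · exact h
  · have := Tn_le_of_le (show k + 1 ≤ Kn n by omega); omega

theorem Ps_step {k n : Nat} (h1 : Tn k ≤ n) (h2 : n < Tn (k + 1)) :
    Ps (n + 1) = Ps n + ((k : Nat) + 1 : Int) := by
  have := Kn_eq h1 h2
  simp [Ps, this]

theorem Ps_block_add (k : Nat) : ∀ c : Nat, c ≤ k + 1 → Ps (Tn k + c) = Ps (Tn k) + (c : Int) * ((k : Int) + 1) := by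
  intro c
  induction c with
  | zero => intro _; simp
  | succ c ih =>
      intro hc
      have h1 : Tn k ≤ Tn k + c := by omega
      have h2 : Tn k + c < Tn (k + 1) := by
        have : Tn (k + 1) = Tn k + (k + 1) := rfl
        omega
      have := Ps_step h1 h2
      rw [show Tn k + (c + 1) = (Tn k + c) + 1 from rfl, this, ih (by omega)]
      push_cast; ring

theorem Ps_Tn (k : Nat) : Ps (Tn k) = Qn k := by
  induction k with
  | zero => simp [Tn, Ps, Qn]
  | succ k ih =>
      have : Tn (k + 1) = Tn k + (k + 1) := rfl
      rw [this, Ps_block_add k (k + 1) (by omega), ih]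
      simp only [Qn]; push_cast; ring

theorem Ps_closed {k n : Nat} (h1 : Tn k ≤ n) (h2 : n < Tn (k + 1)) :
    Ps n = Qn k + ((n : Int) - (Tn k : Int)) * ((k : Int) + 1) := by
  have hc : n - Tn k ≤ k + 1 := by
    have : Tn (k + 1) = Tn k + (k + 1) := rfl
    omega
  have := Ps_block_add k (n - Tn k) hc
  rw [show Tn k + (n - Tn k) = n by omega] at this
  rw [this, Ps_Tn]
  congr 1
  have : ((n - Tn k : Nat) : Int) = (n : Int) - (Tn k : Int) := by push_cast [h1]; ring
  rw [this]

theorem Ps_ge (n : Nat) : (n : Int) ≤ Ps n := by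
  induction n with
  | zero => simp [Ps]
  | succ n ih =>
      have : (0 : Int) ≤ (Kn n : Int) := Int.natCast_nonneg _
      simp only [Ps]; push_cast; omega

-- algebraic closed forms for the two exact divisions in bPrefix
theorem Qn_mul_six (k : Nat) : ((k : Int)) * ((k : Int) + 1) * (2 * (k : Int) + 1) = 6 * Qn k := by
  induction k with
  | zero => simp [Qn]
  | succ k ih => simp [Qn]; push_cast; push_cast at ih; ring_nf; ring_nf at ih; linarith

theorem Tn_mul_two (k : Nat) : ((k : Int)) * ((k : Int) + 1) = 2 * (Tn k : Int) := by
  induction k with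
  | zero => simp [Tn]
  | succ k ih => simp [Tn]; push_cast; push_cast at ih; ring_nf; ring_nf at ih; linarith

-- bFindK finds the block index of position n
theorem bFindK_correct (n : Int) (hn : 1 ≤ n) :
    ∀ k : Nat, Tn k ≤ n.toNat → bFindK n k = Kn n.toNat := by
  intro k hk
  induction k using bFindK.induct n with
  | case1 k h ih =>
      rw [bFindK, if_pos h]
      apply ih
      have h2 : 2 * (Tn (k + 1) : Int) = ((k : Int) + 1) * ((k : Int) + 2) := by
        have := Tn_mul_two (k + 1); push_cast at this; linarith
      omega
  | case2 k h =>
      rw [bFindK, if_neg h]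
      have h2 : 2 * (Tn (k + 1) : Int) = ((k : Int) + 1) * ((k : Int) + 2) := by
        have := Tn_mul_two (k + 1); push_cast at this; linarith
      exact (Kn_eq hk (by omega)).symm

theorem bPrefix_eq (n : Int) : bPrefix n = Ps n.toNat := by
  by_cases hn : n ≤ 0
  · simp [bPrefix, hn, show n.toNat = 0 by omega, Ps]
  · have hn1 : 1 ≤ n := by omega
    have hK := bFindK_correct n hn1 0 (by simp [Tn])
    have hs := Kn_spec n.toNat
    rw [bPrefix, if_neg hn]
    simp only [hK]
    set k := Kn n.toNat with hk
    have e6 : (k : Int) * ((k : Int) + 1) * (2 * (k : Int) + 1) = 6 * Qn k := Qn_mul_six k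
    have e2 : (k : Int) * ((k : Int) + 1) = 2 * (Tn k : Int) := Tn_mul_two k
    rw [e6, e2]
    rw [show PySem.Int.floordiv (6 * Qn k) 6 = Qn k by
      rw [PySem.Int.floordiv_eq_ediv_of_pos (by norm_num)]; exact Int.mul_ediv_cancel_left _ (by norm_num)]
    rw [show PySem.Int.floordiv (2 * (Tn k : Int)) 2 = (Tn k : Int) by
      rw [PySem.Int.floordiv_eq_ediv_of_pos (by norm_num)]; exact Int.mul_ediv_cancel_left _ (by norm_num)]
    rw [Ps_closed hs.1 hs.2]
    have : ((n.toNat : Nat) : Int) = n := by omega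
    rw [this]

-- B's port in spec terms
theorem alt_eq (A B : Int) :
    answer_alt A B = if A > B then 0 else Ps B.toNat - Ps (A - 1).toNat := by
  rw [answer_alt]
  split
  · rfl
  · rw [bPrefix_eq, bPrefix_eq]

-- A-side machinery -----------------------------------------------------------

theorem R0_step (A : Int) (m : Int) (hm : 0 ≤ m) :
    R0 A (m + 1) = if m + 1 = A - 1 then Ps (m + 1).toNat else R0 A m := by
  unfold R0
  by_cases hA : m + 1 = A - 1
  · rw [if_pos (show 1 ≤ A - 1 ∧ A - 1 ≤ m + 1 by omega), if_pos hA, ← hA]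
  · rw [if_neg hA]
    split <;> split <;> first | rfl | omega

theorem foldl_ignore {α β : Type} (f : α → α) :
    ∀ (l : List β) (s : α), l.foldl (fun s' _ => f s') s = f^[l.length] s := by
  intro l
  induction l with
  | nil => intro s; rfl
  | cons x xs ih =>
      intro s
      simp only [List.foldl_cons, List.length_cons, ih]
      rw [Function.iterate_succ_apply]

theorem aStep_error (A B i r : Int) : aStep A B i (.error r) = .error r := rfl

theorem aStep_iterate_error (A B i r : Int) (m : Nat) :
    (aStep A B i)^[m] (.error r) = .error r := by
  induction m with
  | zero => rfl
  | succ m ih => rw [Function.iterate_succ_apply, aStep_error, ih]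

theorem aOuter_error (A B : Int) :
    ∀ (l : List Int) (r : Int),
      l.foldl (aOuter A B) (.error r) = .error r := by
  intro l
  induction l with
  | nil => intro r; rfl
  | cons i l ih =>
      intro r
      simp only [List.foldl_cons]
      rw [show aOuter A B (.error r) i = .error r by
        rw [aOuter, foldl_ignore]; exact aStep_iterate_error A B i r _]
      exact ih r

-- one full or partial inner block, in spec terms
theorem inner (A B : Int) (k : Nat) :
    ∀ c : Nat, c ≤ k + 1 → (Tn k : Int) < B →
      (aStep A B ((k : Int) + 1))^[c] (Except.ok ((Tn k : Int), Ps (Tn k), R0 A (Tn k), 0)) =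
        if B ≤ (Tn k : Int) + c then Except.error (Ps B.toNat - R0 A B)
        else Except.ok ((Tn k : Int) + c, Ps (Tn k + c), R0 A ((Tn k : Int) + c), 0) := by
  intro c
  induction c with
  | zero =>
      intro _ hB
      rw [if_neg (by push_cast; omega)]
      simp
  | succ c ih =>
      intro hc hB
      rw [Function.iterate_succ_apply', ih (by omega) hB]
      by_cases hstop : B ≤ (Tn k : Int) + c
      · rw [if_pos hstop, aStep_error, if_pos (by omega)]
      · rw [if_neg hstop]
        have hblock : Tn k + c < Tn (k + 1) := by
          have : Tn (k + 1) = Tn k + (k + 1) := rfl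
          omega
        have hPs : Ps (Tn k + c + 1) = Ps (Tn k + c) + ((k : Int) + 1) :=
          Ps_step (by omega) hblock
        have hR0 : R0 A ((Tn k : Int) + c + 1)
            = if (Tn k : Int) + c + 1 = A - 1 then Ps (Tn k + c) + ((k : Int) + 1) else R0 A ((Tn k : Int) + c) := by
          rw [R0_step A ((Tn k : Int) + c) (by positivity)]
          by_cases h : (Tn k : Int) + c + 1 = A - 1
          · rw [if_pos h, if_pos h, show ((Tn k : Int) + c + 1).toNat = Tn k + c + 1 by omega, hPs]
          · rw [if_neg h, if_neg h]
        have e0 : (Tn k : Int) + ((c + 1 : Nat) : Int) = (Tn k : Int) + c + 1 := by push_cast; ring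
        have e1 : Tn k + (c + 1) = Tn k + c + 1 := rfl
        simp only [aStep]
        by_cases hA : (Tn k : Int) + c + 1 = A - 1
        · simp only [if_pos hA]
          by_cases hBhit : (Tn k : Int) + c + 1 = B
          · rw [if_pos hBhit, if_pos (by omega)]
            have hBt : B.toNat = Tn k + c + 1 := by omega
            have hRB : R0 A B = Ps (Tn k + c) + ((k : Int) + 1) := by
              unfold R0
              rw [if_pos (by omega), show (A - 1).toNat = Tn k + c + 1 by omega, hPs]
            rw [hRB, hBt, hPs]
          · rw [if_neg hBhit, if_neg (by omega), e0, e1, hPs, hR0, if_pos hA]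
        · simp only [if_neg hA]
          by_cases hBhit : (Tn k : Int) + c + 1 = B
          · rw [if_pos hBhit, if_pos (by omega)]
            have hBt : B.toNat = Tn k + c + 1 := by omega
            have hRB : R0 A B = R0 A ((Tn k : Int) + c) := by
              unfold R0; split <;> split <;> first | rfl | omega
            rw [hRB, hBt, hPs]
          · rw [if_neg hBhit, if_neg (by omega), e0, e1, hPs, hR0, if_neg hA]

-- the outer loop, from block m+1 on
theorem outer (A B : Int) :
    ∀ (d m : Nat), m + d = 999 → (Tn m : Int) < B → B ≤ (Tn 999 : Int) →
      (PySem.List.pyRange ((m : Int) + 1) 1000 1).foldl (aOuter A B)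
          (.ok ((Tn m : Int), Ps (Tn m), R0 A ((Tn m : Int)), 0)) =
        .error (Ps B.toNat - R0 A B) := by
  intro d
  induction d with
  | zero =>
      intro m hm hB hB'
      subst_vars
      omega
  | succ d ih =>
      intro m hm hB hB'
      have hmlt : (m : Int) + 1 < 1000 := by push_cast; omega
      rw [PySem.List.pyRange_one_cons hmlt, List.foldl_cons]
      have hlen : (PySem.List.pyRange 0 ((m : Int) + 1) 1).length = m + 1 := by
        rw [PySem.List.length_pyRange_one]; omega
      have hin := inner A B m (m + 1) (by omega) hB
      rw [show aOuter A B (.ok ((Tn m : Int), Ps (Tn m), R0 A ((Tn m : Int)), 0)) ((m : Int) + 1)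
            = if B ≤ (Tn m : Int) + (m + 1) then Except.error (Ps B.toNat - R0 A B)
              else Except.ok ((Tn m : Int) + (m + 1), Ps (Tn m + (m + 1)), R0 A ((Tn m : Int) + (m + 1)), 0) by
            rw [aOuter, foldl_ignore, hlen]; exact hin]
      by_cases hstop : B ≤ (Tn m : Int) + (m + 1)
      · rw [if_pos hstop]
        exact aOuter_error A B _ _
      · rw [if_neg hstop]
        have hT : Tn (m + 1) = Tn m + (m + 1) := rfl
        have h1 : ((Tn (m + 1) : Nat) : Int) = (Tn m : Int) + (m + 1) := by rw [hT]; push_cast; ring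
        have := ih (m + 1) (by omega) (by omega) hB'
        rw [show ((m + 1 : Nat) : Int) + 1 = (m : Int) + 1 + 1 by push_cast; ring] at this
        rw [← h1, ← hT]
        exact this

theorem Tn999 : (Tn 999 : Int) = 499500 := by
  have := Tn_mul_two 999; norm_num at this; linarith

theorem answer_eq (A B : Int) (h1 : 1 ≤ B) (h2 : B ≤ 499500) :
    answer A B = Ps B.toNat - R0 A B := by
  rw [answer, if_neg (by omega)]
  have h0 : R0 A 0 = 0 := by unfold R0; rw [if_neg (by omega)]
  have := outer A B 999 0 (by omega) (by simp [Tn]; omega) (by rw [Tn999]; omega)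
  simp only [Nat.cast_zero, zero_add] at this
  rw [show (Except.ok ((0 : Int), (0 : Int), (0 : Int), (0 : Int)) : Except Int (Int × Int × Int × Int))
        = .ok ((Tn 0 : Int), Ps (Tn 0), R0 A ((Tn 0 : Int)), 0) by
      simp [Tn, Ps, h0]]
  rw [show ((1 : Int)) = ((0 : Nat) : Int) + 1 by norm_num] at this ⊢
  rw [this]

-- ===== VERDICT (by name: the statement is the Claim_ definition above) =====
theorem answer_spec : Claim_unchanged_answer := by
  intro A B _ hpre
  unfold Spec_answer
  intro hnD
  obtain ⟨hB0, hB1⟩ := hpre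
  by_cases hz : B = 0
  · subst hz
    rw [answer, if_pos rfl, alt_eq]
    split
    · rfl
    · next h =>
      rw [show (0 : Int).toNat = 0 by rfl, show (A - 1).toNat = 0 by omega]
      simp [Ps]
  · have h1 : 1 ≤ B := by omega
    have hA : A ≤ B + 1 := by
      by_contra h
      exact hnD ⟨h1, hB1, by omega⟩
    rw [answer_eq A B h1 hB1, alt_eq]
    by_cases hAB : A > B
    · rw [if_pos hAB]
      have hAeq : A - 1 = B := by omega
      rw [show R0 A B = Ps (A - 1).toNat by unfold R0; rw [if_pos (by omega)]]
      rw [hAeq]; ring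
    · rw [if_neg hAB]
      by_cases hA1 : 1 ≤ A - 1
      · rw [show R0 A B = Ps (A - 1).toNat by unfold R0; rw [if_pos (by omega)]]
      · rw [show R0 A B = 0 by unfold R0; rw [if_neg (by omega)]]
        rw [show (A - 1).toNat = 0 by omega]
        simp [Ps]

theorem answer_changed : Claim_changed_answer := by
  unfold Claim_changed_answer
  refine ⟨by decide, by decide, by decide, ?_, ?_, by decide⟩
  · show answer 5 2 = 3
    rw [answer_eq 5 2 (by norm_num) (by norm_num)]
    rw [show R0 5 2 = 0 by unfold R0; rw [if_neg (by omega)]]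
    decide
  · show answer_alt 5 2 = 0
    rw [answer_alt, if_pos (by norm_num)]

theorem answer_tight : Claim_exact_answer := by
  intro A B _ _ hD
  obtain ⟨h1, h2, h3⟩ := hD
  rw [answer_eq A B h1 h2, alt_eq, if_pos (by omega)]
  rw [show R0 A B = 0 by unfold R0; rw [if_neg (by omega)]]
  have := Ps_ge B.toNat
  omega
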